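-- pv_equiv track=rewrite | github.com/vthuan-dev/girl-picks | scripts/check-domain-info.py | parse_whois_info
-- ===== SOURCE A (Python) =====
-- def parse_whois_info(whois_text):
--     """Parse whois text to extract key information"""
--     if not whois_text:
--         return None
--
--     info = {
--         'creation_date': None,
--         'expiration_date': None,
--         'registrar': None,
--         'status': None,
--     }
--
--     lines = whois_text.lower()
--
--     # Try to find creation date
--     for line in whois_text.split('\n'):
--         if 'creation date' in line.lower() or 'created' in line.lower():
--             info['creation_date'] = line.strip()
--         if 'expiration date' in line.lower() or 'expires' in line.lower() or 'expiry' in line.lower():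
--             info['expiration_date'] = line.strip()
--         if 'registrar:' in line.lower():
--             info['registrar'] = line.strip()
--         if 'status:' in line.lower():
--             info['status'] = line.strip()
--
--     return info
-- ===== SOURCE B (Python) =====
-- FIELDS = [
--     ('creation_date', ('creation date', 'created')),
--     ('expiration_date', ('expiration date', 'expires', 'expiry')),
--     ('registrar', ('registrar:',)),
--     ('status', ('status:',)),
-- ]
--
--
-- def parse_whois_info(whois_text):
--     """Parse whois text to extract key information (table-driven)."""
--     if not whois_text:
--         return None
--     lines = whois_text.split('\n')
--     info = {}
--     for field, keywords in FIELDS: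
--         value = None
--         for line in lines:
--             if any(k in line.lower() for k in keywords):
--                 value = line.strip()
--         info[field] = value
--     return info
-- ===== Notes on version B (the rewrite author's own statement) =====
-- stated objective: simpler
-- what changed: Replaces the single line-loop with four hard-coded if-updates into a pre-built dict by a table of (field, keywords) pairs scanned per field, building the dict from scratch; last match still wins per field.
import Mathlib
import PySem

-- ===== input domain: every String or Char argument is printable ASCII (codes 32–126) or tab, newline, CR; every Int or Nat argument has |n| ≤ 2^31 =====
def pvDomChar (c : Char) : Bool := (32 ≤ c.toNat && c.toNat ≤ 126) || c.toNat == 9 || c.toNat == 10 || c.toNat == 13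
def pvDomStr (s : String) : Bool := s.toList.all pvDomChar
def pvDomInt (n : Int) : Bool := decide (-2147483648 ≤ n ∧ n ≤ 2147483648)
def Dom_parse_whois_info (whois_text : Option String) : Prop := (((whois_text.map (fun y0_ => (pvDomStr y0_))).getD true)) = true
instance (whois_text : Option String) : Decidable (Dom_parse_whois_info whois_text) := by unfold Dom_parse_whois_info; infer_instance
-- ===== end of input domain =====

-- B is a simpler table-driven re-decomposition of A (same cost); equivalence of return values is proved on all inputs.

-- ===== PORT A =====
-- 'kw in line.lower()'
def pvHas (kw line : String) : Bool := PySem.Str.isIn kw (PySem.Str.lower line)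

-- the body of A's single loop over the lines: four sequential conditional dict assignments
def pvStepA (info : PySem.Dict String (Option String)) (line : String) : PySem.Dict String (Option String) :=
  let info := if pvHas "creation date" line || pvHas "created" line then
      info.insert "creation_date" (some (PySem.Str.strip line)) else info
  let info := if pvHas "expiration date" line || pvHas "expires" line || pvHas "expiry" line then
      info.insert "expiration_date" (some (PySem.Str.strip line)) else info
  let info := if pvHas "registrar:" line then
      info.insert "registrar" (some (PySem.Str.strip line)) else info
  let info := if pvHas "status:" line then
      info.insert "status" (some (PySem.Str.strip line)) else info
  info

def parse_whois_info (whois_text : Option String) : Option (List (String × Option String)) :=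
  match whois_text with
  | none => none
  | some s =>
    if s = "" then none else
    let info : PySem.Dict String (Option String) :=
      PySem.Dict.ofList [("creation_date", none), ("expiration_date", none),
                         ("registrar", none), ("status", none)]
    -- 'lines = whois_text.lower()' in A is dead code (unused); \n ≠ "" so split? is some
    let info := (((PySem.Str.split? s "\n").getD []).foldl pvStepA info)
    some info.items

-- ===== PORT B =====
def pvFIELDS : List (String × List String) :=
  [("creation_date", ["creation date", "created"]),
   ("expiration_date", ["expiration date", "expires", "expiry"]),
   ("registrar", ["registrar:"]),
   ("status", ["status:"])]

-- the inner per-field loop of B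
def pvFieldLoop (kws : List String) (lines : List String) (v : Option String) : Option String :=
  lines.foldl (fun v line =>
    if kws.any (fun k => PySem.Str.isIn k (PySem.Str.lower line)) then some (PySem.Str.strip line) else v) v

def parse_whois_info_alt (whois_text : Option String) : Option (List (String × Option String)) :=
  match whois_text with
  | none => none
  | some s =>
    if s = "" then none else
    let lines := (PySem.Str.split? s "\n").getD []
    let info := pvFIELDS.foldl
      (fun d fk => d.insert fk.1 (pvFieldLoop fk.2 lines none)) PySem.Dict.empty
    some info.items

-- ===== PRECONDITION & SPEC =====
def Spec_parse_whois_info (whois_text : Option String) (out : Option (List (String × Option String))) : Prop := out = parse_whois_info_alt whois_text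
instance (whois_text : Option String) (out : Option (List (String × Option String))) : Decidable (Spec_parse_whois_info whois_text out) := by unfold Spec_parse_whois_info; infer_instance

-- ===== CLAIM (what is proved, stated in full; the proofs are below) =====
def Claim_equal_parse_whois_info : Prop := ∀ (whois_text : Option String), Dom_parse_whois_info whois_text → Spec_parse_whois_info whois_text (parse_whois_info whois_text)

-- ===== LEMMAS AND PROOFS =====

-- Dict.insert on the concrete 4-key dict acts on one component (overwrite in place)
lemma pv_ins_cd (c e r s : Option String) (v : Option String) :
    (PySem.Dict.mk [("creation_date", c), ("expiration_date", e), ("registrar", r), ("status", s)]).insert "creation_date" v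
    = PySem.Dict.mk [("creation_date", v), ("expiration_date", e), ("registrar", r), ("status", s)] := by
  simp [PySem.Dict.insert, PySem.Dict.contains]

lemma pv_ins_ed (c e r s : Option String) (v : Option String) :
    (PySem.Dict.mk [("creation_date", c), ("expiration_date", e), ("registrar", r), ("status", s)]).insert "expiration_date" v
    = PySem.Dict.mk [("creation_date", c), ("expiration_date", v), ("registrar", r), ("status", s)] := by
  simp [PySem.Dict.insert, PySem.Dict.contains]

lemma pv_ins_rg (c e r s : Option String) (v : Option String) :
    (PySem.Dict.mk [("creation_date", c), ("expiration_date", e), ("registrar", r), ("status", s)]).insert "registrar" v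
    = PySem.Dict.mk [("creation_date", c), ("expiration_date", e), ("registrar", v), ("status", s)] := by
  simp [PySem.Dict.insert, PySem.Dict.contains]

lemma pv_ins_st (c e r s : Option String) (v : Option String) :
    (PySem.Dict.mk [("creation_date", c), ("expiration_date", e), ("registrar", r), ("status", s)]).insert "status" v
    = PySem.Dict.mk [("creation_date", c), ("expiration_date", e), ("registrar", r), ("status", v)] := by
  simp [PySem.Dict.insert, PySem.Dict.contains]

-- A's loop body on the 4-key dict updates each field independently
lemma pv_step_eq (l : String) (c e r s : Option String) :
    pvStepA (PySem.Dict.mk [("creation_date", c), ("expiration_date", e), ("registrar", r), ("status", s)]) l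
    = PySem.Dict.mk
        [("creation_date", if pvHas "creation date" l || pvHas "created" l then some (PySem.Str.strip l) else c),
         ("expiration_date", if pvHas "expiration date" l || pvHas "expires" l || pvHas "expiry" l then some (PySem.Str.strip l) else e),
         ("registrar", if pvHas "registrar:" l then some (PySem.Str.strip l) else r),
         ("status", if pvHas "status:" l then some (PySem.Str.strip l) else s)] := by
  unfold pvStepA
  split_ifs <;> simp_all [pv_ins_cd, pv_ins_ed, pv_ins_rg, pv_ins_st]

-- A's fold over the 4-key dict acts componentwise, each field tracking B's inner loop
lemma pv_loop_eq (lines : List String) (c e r s : Option String) :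
    lines.foldl pvStepA
      (PySem.Dict.mk [("creation_date", c), ("expiration_date", e), ("registrar", r), ("status", s)]) =
    PySem.Dict.mk [("creation_date", pvFieldLoop ["creation date", "created"] lines c),
                   ("expiration_date", pvFieldLoop ["expiration date", "expires", "expiry"] lines e),
                   ("registrar", pvFieldLoop ["registrar:"] lines r),
                   ("status", pvFieldLoop ["status:"] lines s)] := by
  induction lines generalizing c e r s with
  | nil => rfl
  | cons l ls ih =>
    rw [List.foldl_cons, pv_step_eq, ih]
    simp [pvFieldLoop, pvHas, Bool.or_assoc]

-- ===== VERDICT (by name: the statement is the Claim_ definition above) =====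
theorem parse_whois_info_spec : Claim_equal_parse_whois_info := by
  intro whois_text _
  unfold Spec_parse_whois_info parse_whois_info parse_whois_info_alt
  match whois_text with
  | none => rfl
  | some s =>
    by_cases hs : s = ""
    · simp [hs]
    · simp only [hs, if_false]
      have h0 : (PySem.Dict.ofList [("creation_date", (none : Option String)), ("expiration_date", none),
                   ("registrar", none), ("status", none)])
          = PySem.Dict.mk [("creation_date", none), ("expiration_date", none),
                           ("registrar", none), ("status", none)] := by decide
      rw [h0, pv_loop_eq]
      simp [pvFIELDS, PySem.Dict.empty, PySem.Dict.insert, PySem.Dict.contains]
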